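-- pv_equiv track=rewrite | github.com/viniciusfardinf/lista-de-exercicios | 2.py | pertence_fibonacci
-- ===== SOURCE A (Python) =====
-- def pertence_fibonacci(numero):
--     fib_1, fib_2 = 0, 1
--     if numero == 0:
--         return True
--     while fib_2 <= numero:
--         if fib_2 == numero:
--             return True
--         fib_1, fib_2 = fib_2, fib_1 + fib_2
--     return False
-- ===== SOURCE B (Python) =====
-- def _is_square(t):
--     # binary-search integer square root: invariant lo*lo <= t < hi*hi
--     lo, hi = 0, t + 1
--     while hi - lo > 1:
--         mid = (lo + hi) // 2
--         if mid * mid <= t: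
--             lo = mid
--         else:
--             hi = mid
--     return lo * lo == t
--
-- def pertence_fibonacci(numero):
--     if numero < 0:
--         return False
--     t1 = 5 * numero * numero + 4
--     if _is_square(t1):
--         return True
--     t2 = 5 * numero * numero - 4
--     return t2 >= 0 and _is_square(t2)
-- ===== Notes on version B (the rewrite author's own statement) =====
-- stated objective: alternative
-- what changed: Replaces the Fibonacci-generation loop by the closed-form Gessel test (numero is Fibonacci iff five times its square, plus or minus four, is a perfect square), detected with a hand-written binary-search integer square root.
import Mathlib
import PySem

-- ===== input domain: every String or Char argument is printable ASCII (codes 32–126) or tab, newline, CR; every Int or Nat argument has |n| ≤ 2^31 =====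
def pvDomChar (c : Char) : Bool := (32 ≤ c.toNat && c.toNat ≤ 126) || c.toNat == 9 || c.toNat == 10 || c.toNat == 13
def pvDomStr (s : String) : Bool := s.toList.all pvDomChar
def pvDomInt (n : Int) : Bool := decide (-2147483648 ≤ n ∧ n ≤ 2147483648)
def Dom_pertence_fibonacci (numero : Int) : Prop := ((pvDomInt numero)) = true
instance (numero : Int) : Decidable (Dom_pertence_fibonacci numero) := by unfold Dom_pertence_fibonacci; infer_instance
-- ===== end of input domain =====

-- B replaces A's Fibonacci-generation loop by the closed-form test "5n²+4 or 5n²−4 is a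
-- perfect square", with a hand-written binary-search integer square root (alternative algorithm).

-- ===== PORT A =====
-- the while loop, with fuel: the loop exits on its own before the fuel runs out
-- (fib grows past `numero` within `numero.toNat + 2` iterations; proved in `fib_big` below)
def fibLoop (f1 f2 numero : Int) : Nat → Bool
  | 0 => false
  | fuel + 1 =>
    if f2 ≤ numero then
      if f2 = numero then true else fibLoop f2 (f1 + f2) numero fuel
    else false

def pertence_fibonacci (numero : Int) : Bool :=
  if numero = 0 then true else fibLoop 0 1 numero (numero.toNat + 2)

-- ===== PORT B =====
-- binary-search integer square root loop of Source B's _is_square (invariant lo*lo ≤ t < hi*hi)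
def isqLoop (t lo hi : Nat) : Nat :=
  if _h : hi - lo > 1 then
    let mid := (lo + hi) / 2
    if mid * mid ≤ t then isqLoop t mid hi else isqLoop t lo mid
  else lo
termination_by hi - lo
decreasing_by all_goals omega

def isSquareB (t : Nat) : Bool :=
  let lo := isqLoop t 0 (t + 1)
  lo * lo == t

def pertence_fibonacci_alt (numero : Int) : Bool :=
  if numero < 0 then false
  else
    let t1 := 5 * numero * numero + 4
    if isSquareB t1.toNat then true
    else
      let t2 := 5 * numero * numero - 4
      decide (0 ≤ t2) && isSquareB t2.toNat

-- ===== PRECONDITION & SPEC =====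
def Spec_pertence_fibonacci (numero : Int) (out : Bool) : Prop := out = pertence_fibonacci_alt numero
instance (numero : Int) (out : Bool) : Decidable (Spec_pertence_fibonacci numero out) := by unfold Spec_pertence_fibonacci; infer_instance

-- ===== CLAIM (what is proved, stated in full; the proofs are below) =====
def Claim_equal_pertence_fibonacci : Prop := ∀ (numero : Int), Dom_pertence_fibonacci numero → Spec_pertence_fibonacci numero (pertence_fibonacci numero)

-- ===== LEMMAS AND PROOFS =====

theorem isqLoop_spec (t lo hi : Nat) : lo * lo ≤ t → t < hi * hi → lo < hi →
    isqLoop t lo hi * isqLoop t lo hi ≤ t ∧ t < (isqLoop t lo hi + 1) * (isqLoop t lo hi + 1) := by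
  fun_induction isqLoop t lo hi with
  | case1 lo hi h mid hle ih => intro h1 h2 h3; exact ih hle h2 (by omega)
  | case2 lo hi h mid hle ih => intro h1 h2 h3; exact ih h1 (by omega) (by omega)
  | case3 lo hi h =>
    intro h1 h2 h3
    have : hi = lo + 1 := by omega
    subst this
    exact ⟨h1, h2⟩

theorem isSquareB_iff (t : Nat) : isSquareB t = true ↔ ∃ m : Nat, m * m = t := by
  unfold isSquareB
  have h := isqLoop_spec t 0 (t+1) (by simp) (by nlinarith) (by omega)
  rw [beq_iff_eq]
  constructor
  · exact fun he => ⟨_, he⟩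
  · rintro ⟨m, rfl⟩
    have hm : isqLoop (m*m) 0 (m*m+1) = m := by nlinarith [h.1, h.2]
    rw [hm]

theorem fib_id (k : Nat) :
    ((Nat.fib (k+1) : Int))^2 - (Nat.fib (k+1) : Int) * (Nat.fib k : Int) - ((Nat.fib k : Int))^2 = (-1)^k := by
  induction k with
  | zero => simp
  | succ k ih =>
    have h2 : (Nat.fib (k+2) : Int) = Nat.fib k + Nat.fib (k+1) := by
      rw [Nat.fib_add_two]; push_cast; ring
    rw [h2]
    linear_combination (-1:Int) * ih

theorem fib_big (k : Nat) : k + 1 ≤ Nat.fib (k + 2) := by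
  induction k with
  | zero => simp
  | succ k ih =>
    have h1 : 0 < Nat.fib (k+1) := Nat.fib_pos.mpr (by omega)
    have h2 : Nat.fib (k+3) = Nat.fib (k+1) + Nat.fib (k+2) := Nat.fib_add_two
    show k + 2 ≤ Nat.fib (k+3)
    omega

theorem pell_of_fib (k : Nat) : ∃ m : Nat,
    ((m : Int) * m = 5 * (Nat.fib k : Int) * (Nat.fib k) + 4 ∨
     (m : Int) * m = 5 * (Nat.fib k : Int) * (Nat.fib k) - 4) := by
  refine ⟨2 * Nat.fib (k+1) - Nat.fib k, ?_⟩
  have hle : Nat.fib k ≤ 2 * Nat.fib (k+1) := by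
    have := Nat.fib_le_fib_succ (n := k); omega
  have hc : ((2 * Nat.fib (k+1) - Nat.fib k : Nat) : Int) = 2 * (Nat.fib (k+1) : Int) - Nat.fib k := by
    rw [Nat.cast_sub hle]; push_cast; ring
  rw [hc]
  have hid := fib_id k
  rcases Nat.even_or_odd k with he | ho
  · left; rw [he.neg_one_pow] at hid; nlinarith
  · right; rw [ho.neg_one_pow] at hid; nlinarith

theorem parity_mn (m n : Nat) :
    ((m : Int) * m = 5 * (n : Int) * n + 4 ∨ (m : Int) * m = 5 * (n : Int) * n - 4) →
    m % 2 = n % 2 := by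
  intro hm
  rcases Nat.even_or_odd m with ⟨a, rfl⟩ | ⟨a, rfl⟩ <;>
    rcases Nat.even_or_odd n with ⟨b, rfl⟩ | ⟨b, rfl⟩
  · omega
  · exfalso
    rcases hm with h | h
    · have h4 : (4:Int) * ((a:Int)*a) = 20 * ((b:Int)*b) + 20 * b + 9 := by
        push_cast at h ⊢; linear_combination h
      generalize (a:Int) * a = A at h4
      generalize (b:Int) * b = B at h4
      omega
    · have h4 : (4:Int) * ((a:Int)*a) = 20 * ((b:Int)*b) + 20 * b + 1 := by
        push_cast at h ⊢; linear_combination h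
      generalize (a:Int) * a = A at h4
      generalize (b:Int) * b = B at h4
      omega
  · exfalso
    rcases hm with h | h
    · have h4 : (4:Int) * ((a:Int)*a) + 4 * a + 1 = 20 * ((b:Int)*b) + 4 := by
        push_cast at h ⊢; linear_combination h
      generalize (a:Int) * a = A at h4
      generalize (b:Int) * b = B at h4
      omega
    · have h4 : (4:Int) * ((a:Int)*a) + 4 * a + 5 = 20 * ((b:Int)*b) := by
        push_cast at h ⊢; linear_combination h
      generalize (a:Int) * a = A at h4
      generalize (b:Int) * b = B at h4
      omega
  · omega

theorem fib_of_pell (n : Nat) : ∀ m : Nat,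
    ((m : Int) * m = 5 * (n : Int) * n + 4 ∨ (m : Int) * m = 5 * (n : Int) * n - 4) →
    ∃ k, Nat.fib k = n ∧ (m : Int) = 2 * (Nat.fib (k+1) : Int) - (Nat.fib k : Int) := by
  induction n using Nat.strong_induction_on with
  | _ n ih =>
  intro m hm
  by_cases h0 : n = 0
  · subst h0
    have h4 : (m:Int) * m = 4 := by
      rcases hm with h | h
      · linear_combination h
      · exfalso; norm_num at h; nlinarith [Int.natCast_nonneg m]
    have hn4 : m * m = 4 := by exact_mod_cast h4
    have hm2 : m = 2 := by nlinarith
    exact ⟨0, rfl, by subst hm2; simp⟩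
  · by_cases h1 : n = 1
    · subst h1
      rcases hm with h | h
      · have h9 : m * m = 9 := by exact_mod_cast (by linear_combination h : (m:Int)*m = 9)
        have hm3 : m = 3 := by nlinarith
        exact ⟨2, rfl, by subst hm3; simp [Nat.fib]⟩
      · have h9 : m * m = 1 := by exact_mod_cast (by linear_combination h : (m:Int)*m = 1)
        have hm3 : m = 1 := by nlinarith
        exact ⟨1, rfl, by subst hm3; simp [Nat.fib]⟩
    · have hn2 : 2 ≤ n := by omega
      have hN2 : (2:Int) ≤ n := by exact_mod_cast hn2
      have h0m : (0:Int) ≤ m := Int.natCast_nonneg m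
      have hub : (m:Int) < 3 * n := by
        rcases hm with h | h <;> nlinarith
      have hlb : (n:Int) ≤ m := by
        rcases hm with h | h <;> nlinarith
      have hubN : m < 3 * n := by exact_mod_cast hub
      have hlbN : n ≤ m := by exact_mod_cast hlb
      have hpar : m % 2 = n % 2 := parity_mn m n hm
      set n' : Nat := (m - n) / 2 with hn'
      set m' : Nat := (5 * n - m) / 2 with hm'
      have e1 : 2 * (n' : Int) = (m:Int) - n := by omega
      have e2 : 2 * (m' : Int) = 5 * (n:Int) - m := by omega
      have hlt : n' < n := by omega
      have s1 : (2 * (n':Int)) * (2 * n') = ((m:Int) - n) * ((m:Int) - n) := by rw [e1]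
      have s2 : (2 * (m':Int)) * (2 * m') = (5 * (n:Int) - m) * (5 * (n:Int) - m) := by rw [e2]
      have hm'' : ((m' : Int) * m' = 5 * (n' : Int) * n' + 4 ∨ (m' : Int) * m' = 5 * (n' : Int) * n' - 4) := by
        rcases hm with h | h
        · right
          have h4 : (4:Int) * ((m':Int) * m') = 20 * ((n':Int) * n') - 16 := by
            linear_combination s2 - 5 * s1 - 4 * h
          linarith
        · left
          have h4 : (4:Int) * ((m':Int) * m') = 20 * ((n':Int) * n') + 16 := by
            linear_combination s2 - 5 * s1 - 4 * h
          linarith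
      obtain ⟨k, hk, hmk⟩ := ih n' hlt m' hm''
      have hkc : (Nat.fib k : Int) = (n' : Int) := by exact_mod_cast hk
      have hf2 : (Nat.fib (k+2) : Int) = (Nat.fib k : Int) + Nat.fib (k+1) := by
        rw [Nat.fib_add_two]; push_cast; ring
      have hfib : (Nat.fib (k+1) : Int) = n := by linarith
      refine ⟨k+1, by exact_mod_cast hfib, ?_⟩
      have : (k+1) + 1 = k + 2 := rfl
      rw [this, hf2, hfib]
      linarith

theorem loop_iff (fuel : Nat) : ∀ (i : Nat) (n : Int), n < (Nat.fib (i + fuel) : Int) →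
    (fibLoop (Nat.fib i) (Nat.fib (i+1)) n fuel = true ↔ ∃ j, i + 1 ≤ j ∧ (Nat.fib j : Int) = n) := by
  induction fuel with
  | zero =>
    intro i n hn
    simp only [Nat.add_zero] at hn
    simp only [fibLoop]
    constructor
    · intro h; cases h
    · rintro ⟨j, hj, hfj⟩
      have h1 : Nat.fib i ≤ Nat.fib j := Nat.fib_mono (by omega)
      have h2 : (Nat.fib i : Int) ≤ Nat.fib j := by exact_mod_cast h1
      omega
  | succ fuel ih =>
    intro i n hn
    simp only [fibLoop]
    by_cases hle : (Nat.fib (i+1) : Int) ≤ n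
    · rw [if_pos hle]
      by_cases heq : (Nat.fib (i+1) : Int) = n
      · rw [if_pos heq]
        simp only [true_iff]
        exact ⟨i+1, le_refl _, heq⟩
      · rw [if_neg heq]
        have hstep : (Nat.fib i : Int) + Nat.fib (i+1) = (Nat.fib (i+1+1) : Int) := by
          rw [Nat.fib_add_two]; push_cast; ring
        rw [hstep]
        have hn' : n < (Nat.fib (i+1+fuel) : Int) := by
          have he : i+1+fuel = i + (fuel+1) := by omega
          rw [he]; exact hn
        rw [ih (i+1) n hn']
        constructor
        · rintro ⟨j, hj, h⟩; exact ⟨j, by omega, h⟩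
        · rintro ⟨j, hj, h⟩
          refine ⟨j, ?_, h⟩
          rcases Nat.eq_or_lt_of_le hj with rfl | h2
          · exact absurd h heq
          · omega
    · rw [if_neg hle]
      constructor
      · intro h; cases h
      · rintro ⟨j, hj, hfj⟩
        exfalso
        have h1 : Nat.fib (i+1) ≤ Nat.fib j := Nat.fib_mono hj
        have h2 : (Nat.fib (i+1) : Int) ≤ Nat.fib j := by exact_mod_cast h1
        omega

theorem charA (n : Int) : pertence_fibonacci n = true ↔ ∃ k, (Nat.fib k : Int) = n := by
  unfold pertence_fibonacci
  by_cases h0 : n = 0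
  · subst h0
    rw [if_pos rfl]
    simp only [true_iff]
    exact ⟨0, by simp⟩
  · rw [if_neg h0]
    have hbig : n < (Nat.fib (0 + (n.toNat + 2)) : Int) := by
      have h1 := fib_big n.toNat
      have h2 : (0 : Nat) + (n.toNat + 2) = n.toNat + 2 := by omega
      rw [h2]
      have h3 : (n.toNat : Int) + 1 ≤ (Nat.fib (n.toNat+2) : Int) := by exact_mod_cast h1
      have h4 := Int.self_le_toNat n
      omega
    have hiff := loop_iff (n.toNat + 2) 0 n hbig
    simp only [Nat.fib_zero, Nat.fib_one, Nat.cast_zero, Nat.cast_one, Nat.zero_add] at hiff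
    rw [hiff]
    constructor
    · rintro ⟨j, hj, h⟩; exact ⟨j, h⟩
    · rintro ⟨k, hk⟩
      refine ⟨k, ?_, hk⟩
      rcases Nat.eq_zero_or_pos k with rfl | h
      · simp only [Nat.fib_zero, Nat.cast_zero] at hk
        exact absurd hk.symm h0
      · omega

theorem sq_toNat (t : Int) (ht : 0 ≤ t) : (isSquareB t.toNat = true) ↔ ∃ m : Nat, (m:Int) * m = t := by
  rw [isSquareB_iff]
  constructor
  · rintro ⟨m, hm⟩
    refine ⟨m, ?_⟩
    rw [← Int.toNat_of_nonneg ht, ← hm]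
    push_cast; ring
  · rintro ⟨m, hm⟩
    refine ⟨m, ?_⟩
    have hc : ((m * m : Nat) : Int) = t := by push_cast; exact hm
    omega

theorem charB (n : Int) : pertence_fibonacci_alt n = true ↔
    (0 ≤ n ∧ ∃ m : Nat, ((m : Int) * m = 5 * n * n + 4 ∨ (m : Int) * m = 5 * n * n - 4)) := by
  unfold pertence_fibonacci_alt
  by_cases hneg : n < 0
  · rw [if_pos hneg]
    constructor
    · intro h; cases h
    · rintro ⟨h, -⟩; omega
  · rw [if_neg hneg]
    rw [Int.not_lt] at hneg
    have ht1 : (0:Int) ≤ 5 * n * n + 4 := by nlinarith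
    by_cases h1 : isSquareB (5 * n * n + 4).toNat = true
    · simp only [h1, if_pos, true_iff]
      obtain ⟨m, hm⟩ := (sq_toNat _ ht1).mp h1
      exact ⟨hneg, m, Or.inl hm⟩
    · simp only [h1, if_false, Bool.false_eq_true, Bool.and_eq_true, decide_eq_true_eq]
      constructor
      · rintro ⟨ht2, hsq⟩
        obtain ⟨m, hm⟩ := (sq_toNat _ ht2).mp hsq
        exact ⟨hneg, m, Or.inr hm⟩
      · rintro ⟨-, m, hm | hm⟩
        · exact absurd ((sq_toNat _ ht1).mpr ⟨m, hm⟩) h1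
        · have ht2 : (0:Int) ≤ 5 * n * n - 4 := by nlinarith [hm, Int.natCast_nonneg m]
          exact ⟨ht2, (sq_toNat _ ht2).mpr ⟨m, hm⟩⟩

-- ===== VERDICT (by name: the statement is the Claim_ definition above) =====
theorem pertence_fibonacci_spec : Claim_equal_pertence_fibonacci := by
  intro n _
  show pertence_fibonacci n = pertence_fibonacci_alt n
  rw [Bool.eq_iff_iff, charA, charB]
  constructor
  · rintro ⟨k, hk⟩
    have h0 : (0:Int) ≤ n := hk ▸ Int.natCast_nonneg _
    refine ⟨h0, ?_⟩
    obtain ⟨m, hm⟩ := pell_of_fib k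
    exact ⟨m, by rw [← hk]; exact_mod_cast hm⟩
  · rintro ⟨h0, m, hm⟩
    obtain ⟨N, rfl⟩ := Int.eq_ofNat_of_zero_le h0
    obtain ⟨k, hk, -⟩ := fib_of_pell N m (by exact_mod_cast hm)
    exact ⟨k, by exact_mod_cast congrArg (Nat.cast : Nat → Int) hk⟩
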